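-- pv_equiv track=rewrite | github.com/martinobanchio/pdf_bookbinder | main.py | gen_page_index
-- ===== SOURCE A (Python) =====
-- import math
--
-- def gen_page_index(n: int) -> list:
--     extend_n = math.ceil(n / 4) * 4
--
--     temp_list = []
--     swap = True
--     for i in range(extend_n // 2):
--         if swap:
--             swap = False
--             temp_list.append([extend_n - 1 - i, i])
--         else:
--             swap = True
--             temp_list.append([i, extend_n - 1 - i])
--     final_list = []
--
--     for a in temp_list:
--         final_list += a
--     final_list = [x if x < n else -1 for x in final_list]
--
--     return final_list
-- ===== SOURCE B (Python) =====
-- import math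
--
-- def gen_page_index(n: int) -> list:
--     extend_n = math.ceil(n / 4) * 4
--     final_list = []
--     for s in range(extend_n // 4):
--         final_list += [extend_n - 1 - 2 * s, 2 * s, 2 * s + 1, extend_n - 2 - 2 * s]
--     return [x if x < n else -1 for x in final_list]
-- ===== Notes on version B (the rewrite author's own statement) =====
-- stated objective: simpler
-- what changed: Replaced the swap-toggle state machine building a list of pairs plus a separate flatten pass by a single sheet-indexed loop that emits the four page numbers of each sheet directly from a positional formula.
import Mathlib
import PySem

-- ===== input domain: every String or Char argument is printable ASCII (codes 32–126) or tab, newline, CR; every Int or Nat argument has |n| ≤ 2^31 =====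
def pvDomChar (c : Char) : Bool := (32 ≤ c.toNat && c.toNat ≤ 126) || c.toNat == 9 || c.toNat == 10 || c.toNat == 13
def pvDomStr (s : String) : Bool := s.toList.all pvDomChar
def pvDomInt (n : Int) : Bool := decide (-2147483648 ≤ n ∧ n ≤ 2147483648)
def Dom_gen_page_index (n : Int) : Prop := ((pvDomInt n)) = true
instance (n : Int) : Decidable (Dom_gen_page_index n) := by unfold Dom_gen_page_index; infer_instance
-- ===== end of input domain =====

-- B replaces A's swap-toggle pair builder + flatten pass by one sheet-indexed loop emitting four pages per sheet (objective: simpler).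

-- ===== PORT A =====
-- math.ceil(n / 4) is exact for |n| ≤ 2^31 (n/4 is an exact binary float there); it equals the
-- ceiling division -((-n) // 4), ported with PySem.Int.floordiv.
def gen_page_index (n : Int) : List Int :=
  let extend_n : Int := -(PySem.Int.floordiv (-n) 4) * 4
  let st := (PySem.List.pyRange 0 (PySem.Int.floordiv extend_n 2) 1).foldl
    (fun (st : Bool × List (List Int)) i =>
      if st.1 then (false, st.2 ++ [[extend_n - 1 - i, i]])
      else (true, st.2 ++ [[i, extend_n - 1 - i]]))
    (true, [])
  let final_list := st.2.foldl (fun acc a => acc ++ a) []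
  final_list.map (fun x => if x < n then x else -1)

-- ===== PORT B =====
def gen_page_index_alt (n : Int) : List Int :=
  let extend_n : Int := -(PySem.Int.floordiv (-n) 4) * 4
  let final_list := (PySem.List.pyRange 0 (PySem.Int.floordiv extend_n 4) 1).foldl
    (fun acc s => acc ++ [extend_n - 1 - 2 * s, 2 * s, 2 * s + 1, extend_n - 2 - 2 * s]) []
  final_list.map (fun x => if x < n then x else -1)

-- ===== PRECONDITION & SPEC =====
def Spec_gen_page_index (n : Int) (out : List Int) : Prop := out = gen_page_index_alt n
instance (n : Int) (out : List Int) : Decidable (Spec_gen_page_index n out) := by unfold Spec_gen_page_index; infer_instance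

-- ===== CLAIM (what is proved, stated in full; the proofs are below) =====
def Claim_equal_gen_page_index : Prop := ∀ (n : Int), Dom_gen_page_index n → Spec_gen_page_index n (gen_page_index n)

-- ===== LEMMAS AND PROOFS =====

-- the flat page list of the first k sheets, for extend_n = E
def pvQuads (E : Int) : Nat → List Int
  | 0 => []
  | k + 1 => pvQuads E k ++ [E - 1 - 2 * k, 2 * k, 2 * k + 1, E - 2 - 2 * k]

-- the list of pairs A's first loop builds over i < 2k, together with the final swap state
def pvPairs (E : Int) : Nat → List (List Int)
  | 0 => []
  | k + 1 => pvPairs E k ++ [[E - 1 - 2 * k, (2 * k : Int)], [2 * k + 1, E - 2 - 2 * k]]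

lemma a_loop (E : Int) (k : Nat) :
    (PySem.List.pyRange 0 (2 * (k : Int)) 1).foldl
      (fun (st : Bool × List (List Int)) i =>
        if st.1 then (false, st.2 ++ [[E - 1 - i, i]])
        else (true, st.2 ++ [[i, E - 1 - i]]))
      (true, []) = (true, pvPairs E k) := by
  induction k with
  | zero => simp [PySem.List.pyRange_one_eq_nil, pvPairs]
  | succ k ih =>
    have h1 : (2 * ((k : Int) + 1)) = (2 * (k : Int) + 1) + 1 := by ring
    rw [show ((k + 1 : Nat) : Int) = (k : Int) + 1 by push_cast; ring, h1,
      PySem.List.pyRange_one_succ_right (by omega),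
      PySem.List.pyRange_one_succ_right (by omega)]
    simp only [List.foldl_append, ih]
    simp [pvPairs]
    omega

lemma b_loop (E : Int) (k : Nat) :
    (PySem.List.pyRange 0 (k : Int) 1).foldl
      (fun acc s => acc ++ [E - 1 - 2 * s, 2 * s, 2 * s + 1, E - 2 - 2 * s]) []
      = pvQuads E k := by
  induction k with
  | zero => simp [PySem.List.pyRange_one_eq_nil, pvQuads]
  | succ k ih =>
    rw [show ((k + 1 : Nat) : Int) = (k : Int) + 1 by push_cast; ring,
      PySem.List.pyRange_one_succ_right (by omega)]
    simp [List.foldl_append, ih, pvQuads]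

lemma flatten_pairs (E : Int) (k : Nat) (init : List Int) :
    (pvPairs E k).foldl (fun acc a => acc ++ a) init = init ++ pvQuads E k := by
  induction k with
  | zero => simp [pvPairs, pvQuads]
  | succ k ih => simp [pvPairs, pvQuads, List.foldl_append, ih]

-- ===== VERDICT (by name: the statement is the Claim_ definition above) =====
theorem gen_page_index_spec : Claim_equal_gen_page_index := by
  intro n _
  unfold Spec_gen_page_index gen_page_index gen_page_index_alt
  set c : Int := -(PySem.Int.floordiv (-n) 4) with hc
  have h2 : PySem.Int.floordiv (c * 4) 2 = 2 * c := by
    rw [PySem.Int.floordiv_eq_ediv_of_pos (by omega)]; omega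
  have h4 : PySem.Int.floordiv (c * 4) 4 = c := by
    rw [PySem.Int.floordiv_eq_ediv_of_pos (by omega)]; omega
  rcases (by omega : c ≤ 0 ∨ 0 < c) with hle | hpos
  · simp only [h2, h4,
      PySem.List.pyRange_one_eq_nil (by omega : (2 * c : Int) ≤ 0),
      PySem.List.pyRange_one_eq_nil (by omega : (c : Int) ≤ 0)]
    simp
  · obtain ⟨k, hk⟩ : ∃ k : Nat, c = (k : Int) := ⟨c.toNat, by omega⟩
    simp only [h2, h4]
    simp only [hk]
    rw [a_loop, b_loop, flatten_pairs]
    simp
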